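-- pv_equiv track=rewrite | github.com/ejolie/problem-solving | BOJ/boj8958.py | solve
-- ===== SOURCE A (Python) =====
-- def solve(string):
--     total = 0
--     cnt = 0
--     for i in range(len(string)):
--         if string[i] == 'O':
--             cnt += 1
--         elif string[i] == 'X':
--             cnt = 0
--         total += cnt
--     return total
-- ===== SOURCE B (Python) =====
-- def solve(string):
--     segs = []
--     cur = []
--     for c in string:
--         if c == 'X':
--             segs.append(cur)
--             cur = []
--         else:
--             cur.append(c)
--     segs.append(cur)
--     return sum(len(seg) - j
--                for seg in segs
--                for j, c in enumerate(seg)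
--                if c == 'O')
-- ===== Notes on version B (the rewrite author's own statement) =====
-- stated objective: alternative
-- what changed: Instead of A's single left-to-right pass accumulating a running streak counter into the total at every character, B first splits the string into its maximal 'X'-free segments and then sums each segment's contribution in closed form: every 'O' at offset j of a segment of length n contributes n - j (its distance to the segment end, i.e. to the next 'X').
import Mathlib
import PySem

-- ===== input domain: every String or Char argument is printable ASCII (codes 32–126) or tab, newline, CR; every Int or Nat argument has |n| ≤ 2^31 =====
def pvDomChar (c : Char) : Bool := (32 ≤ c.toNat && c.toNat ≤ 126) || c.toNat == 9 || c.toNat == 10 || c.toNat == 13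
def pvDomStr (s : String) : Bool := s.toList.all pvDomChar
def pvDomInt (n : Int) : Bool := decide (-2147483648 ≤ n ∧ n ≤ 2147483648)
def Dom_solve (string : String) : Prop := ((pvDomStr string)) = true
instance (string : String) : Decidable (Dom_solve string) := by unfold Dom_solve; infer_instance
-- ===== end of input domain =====

-- B replaces A's running-streak single pass by a split-then-score algorithm: it first
-- builds the maximal 'X'-free segments, then sums each 'O''s closed-form contribution
-- (segment length minus its offset); same O(n) cost, different algorithm (objective: alternative).

-- ===== PORT A =====
-- A iterates the characters left to right with state (total, cnt).
def stepA (st : Int × Int) (ch : Char) : Int × Int :=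
  let c := if ch = 'O' then st.2 + 1 else if ch = 'X' then (0 : Int) else st.2
  (st.1 + c, c)

def solve (string : String) : Int :=
  (string.toList.foldl stepA (0, 0)).1

-- ===== PORT B =====
-- Source B's first loop: build the maximal 'X'-free segments left to right with an
-- accumulator (segs, cur), appending cur on each 'X' and once more at the end
-- (as Python's split('X'): empty segments kept, one final segment always present).
def segStep (st : List (List Char) × List Char) (c : Char) : List (List Char) × List Char :=
  if c = 'X' then (st.1 ++ [st.2], []) else (st.1, st.2 ++ [c])

def segmentsB (l : List Char) : List (List Char) :=
  let st := l.foldl segStep ([], [])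
  st.1 ++ [st.2]

-- Source B's comprehension body for one segment: each 'O' at offset j contributes len - j.
def segScore (seg : List Char) : Int :=
  ((PySem.List.enumerate seg).map
    (fun p => if p.2 = 'O' then (seg.length : Int) - p.1 else 0)).sum

def solve_alt (string : String) : Int :=
  ((segmentsB string.toList).map segScore).sum

-- ===== PRECONDITION & SPEC =====
def Spec_solve (string : String) (out : Int) : Prop := out = solve_alt string
instance (string : String) (out : Int) : Decidable (Spec_solve string out) := by unfold Spec_solve; infer_instance

-- ===== CLAIM (what is proved, stated in full; the proofs are below) =====
def Claim_equal_solve : Prop := ∀ (string : String), Dom_solve string → Spec_solve string (solve string)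

-- ===== LEMMAS AND PROOFS =====

-- Proof-side recursive characterization of the segment list built by B's loop.
def segsRec : List Char → List (List Char)
  | [] => [[]]
  | c :: rest =>
      let segs := segsRec rest
      if c = 'X' then [] :: segs
      else
        match segs with
        | h :: t => (c :: h) :: t
        | [] => [[c]]

-- Shifting the enumerate start while raising the length bound leaves the score unchanged.
lemma enumScore_shift (seg : List Char) (L : Int) : ∀ (s : Int),
    ((PySem.List.enumerate seg (s+1)).map
      (fun p => if p.2 = 'O' then (L + 1) - p.1 else 0)).sum
    = ((PySem.List.enumerate seg s).map
      (fun p => if p.2 = 'O' then L - p.1 else 0)).sum := by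
  induction seg with
  | nil => intro s; simp [PySem.List.enumerate_nil]
  | cons a rest ih =>
    intro s
    simp only [PySem.List.enumerate_cons, List.map_cons, List.sum_cons, ih (s+1)]
    by_cases hO : a = 'O' <;> simp [hO]

lemma segScore_cons (a : Char) (seg : List Char) :
    segScore (a :: seg)
      = (if a = 'O' then (seg.length : Int) + 1 else 0) + segScore seg := by
  unfold segScore
  simp only [PySem.List.enumerate_cons, List.map_cons, List.sum_cons, List.length_cons]
  have h := enumScore_shift seg (seg.length : Int) 0
  push_cast
  rw [zero_add] at h
  rw [h]
  by_cases hO : a = 'O' <;> simp [hO]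

lemma segsRec_ne_nil (l : List Char) : segsRec l ≠ [] := by
  cases l with
  | nil => simp [segsRec]
  | cons c rest =>
    simp only [segsRec]
    split
    · simp
    · cases h : segsRec rest <;> simp

-- The total B computes, and the length of the first segment (distance to the first 'X').
def scoreB (l : List Char) : Int := ((segsRec l).map segScore).sum
def distX (l : List Char) : Int := ((segsRec l).headI.length : Int)

lemma segsRec_eq_cons (rest : List Char) :
    segsRec rest = (segsRec rest).headI :: (segsRec rest).tail := by
  cases e : segsRec rest with
  | nil => exact absurd e (segsRec_ne_nil rest)
  | cons h t => simp

-- B's accumulator loop computes exactly the recursive segment list.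
lemma segFold (l : List Char) : ∀ (acc : List (List Char)) (cur : List Char),
    (l.foldl segStep (acc, cur)).1 ++ [(l.foldl segStep (acc, cur)).2]
      = acc ++ (cur ++ (segsRec l).headI) :: (segsRec l).tail := by
  induction l with
  | nil => intro acc cur; simp [segsRec]
  | cons c rest ih =>
    intro acc cur
    by_cases hX : c = 'X'
    · subst hX
      rw [show segsRec ('X' :: rest) = [] :: segsRec rest from rfl]
      simp only [List.foldl_cons]
      rw [show segStep (acc, cur) 'X' = (acc ++ [cur], []) from rfl]
      rw [ih]
      conv_rhs => rw [segsRec_eq_cons rest]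
      simp
    · simp only [List.foldl_cons, segStep, if_neg hX]
      rw [ih]
      rw [show segsRec (c :: rest)
            = (c :: (segsRec rest).headI) :: (segsRec rest).tail by
        simp only [segsRec, if_neg hX]
        conv_lhs => rw [segsRec_eq_cons rest]]
      simp

lemma segmentsB_eq_segsRec (l : List Char) : segmentsB l = segsRec l := by
  unfold segmentsB
  rw [segFold l [] []]
  simpa using (segsRec_eq_cons l).symm

lemma scoreB_cons (c : Char) (rest : List Char) :
    scoreB (c :: rest)
      = (if c = 'X' then 0 else if c = 'O' then distX rest + 1 else 0) + scoreB rest := by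
  unfold scoreB distX
  by_cases hX : c = 'X'
  · simp [segsRec, hX, segScore, PySem.List.enumerate_nil]
  · rw [show segsRec (c :: rest)
        = (c :: (segsRec rest).headI) :: (segsRec rest).tail by
      simp only [segsRec, if_neg hX]
      conv_lhs => rw [segsRec_eq_cons rest]]
    conv_rhs => rw [segsRec_eq_cons rest]
    simp only [List.map_cons, List.sum_cons, segScore_cons, if_neg hX, List.headI_cons]
    by_cases hO : c = 'O' <;> simp [hO] <;> try ring

lemma distX_cons (c : Char) (rest : List Char) :
    distX (c :: rest) = if c = 'X' then 0 else distX rest + 1 := by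
  unfold distX
  by_cases hX : c = 'X'
  · simp [segsRec, hX]
  · rw [show segsRec (c :: rest)
        = (c :: (segsRec rest).headI) :: (segsRec rest).tail by
      simp only [segsRec, if_neg hX]
      conv_lhs => rw [segsRec_eq_cons rest]]
    simp [hX]

-- A's fold with arbitrary state, expressed through B's quantities.
lemma foldA_char (l : List Char) : ∀ (t c : Int),
    (l.foldl stepA (t, c)).1 = t + scoreB l + c * distX l := by
  induction l with
  | nil =>
    intro t c
    simp [scoreB, distX, segsRec, segScore, PySem.List.enumerate_nil]
  | cons x rest ih =>
    intro t c
    simp only [List.foldl_cons, stepA]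
    rw [ih, scoreB_cons, distX_cons]
    by_cases hO : x = 'O'
    · simp [hO]
      ring
    · by_cases hX : x = 'X'
      · simp [hX]
      · simp only [if_neg hO, if_neg hX]
        ring

-- ===== VERDICT (by name: the statement is the Claim_ definition above) =====
theorem solve_spec : Claim_equal_solve := by
  intro s _
  unfold Spec_solve solve solve_alt
  rw [segmentsB_eq_segsRec]
  have := foldA_char s.toList 0 0
  simpa [scoreB] using this
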